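-- pv_equiv track=rewrite | github.com/jiwon2121/Algorithm | M_and_N/problem2.py | N_and_M
-- ===== SOURCE A (Python) =====
-- def N_and_M(n_lst, m):
--     array = []
--
--     if m == 1:
--         for lst in n_lst:
--             array.append([lst])
--         return array
--
--     for i in range(len(n_lst)):
--         copied = n_lst[i:]
--
--         if len(copied) < m:
--             break
--
--         number = copied.pop(0)
--         inner_lst = N_and_M(copied, m - 1)
--
--         for lst in inner_lst:
--             temp = [number]
--             temp.extend(lst)
--             array.append(temp)
--
--     return array
-- ===== SOURCE B (Python) =====
-- def N_and_M(n_lst, m):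
--     # Iterative level-by-level (breadth-first) expansion of index tuples; no recursion, no slicing.
--     n = len(n_lst)
--     if m < 1 or m > n:
--         return []  # no size-m combinations to produce
--     partial = [[]]
--     for _ in range(m):
--         partial = [p + [j] for p in partial for j in range(p[-1] + 1 if p else 0, n)]
--     return [[n_lst[j] for j in p] for p in partial]
-- ===== Notes on version B (the rewrite author's own statement) =====
-- stated objective: alternative
-- what changed: Replaced the depth-first recursion over list slices (pop(0)/n_lst[i:] with an inner break) by an iterative breadth-first expansion: after a bounds guard, a loop grows index tuples level by level with a flat comprehension, then one final indexing pass; no recursion and no slicing.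
import Mathlib
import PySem

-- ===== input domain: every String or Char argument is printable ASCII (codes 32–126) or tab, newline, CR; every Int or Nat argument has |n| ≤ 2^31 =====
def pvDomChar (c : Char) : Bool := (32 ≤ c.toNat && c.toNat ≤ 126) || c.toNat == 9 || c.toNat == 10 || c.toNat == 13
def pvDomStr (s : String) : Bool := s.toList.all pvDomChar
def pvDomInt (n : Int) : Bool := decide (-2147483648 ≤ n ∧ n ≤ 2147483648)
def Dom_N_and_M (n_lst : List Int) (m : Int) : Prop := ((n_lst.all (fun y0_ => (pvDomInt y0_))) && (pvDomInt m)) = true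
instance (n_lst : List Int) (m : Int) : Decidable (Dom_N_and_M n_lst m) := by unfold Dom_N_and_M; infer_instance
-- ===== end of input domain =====

-- B replaces A's depth-first recursion over slices by an iterative breadth-first expansion of
-- index tuples (objective: alternative, same cost).

-- ===== PORT A =====
-- A is recursive on m; the Nat fuel is m.toNat. For m ≤ 0 the Python recurses through
-- negative m, popping one element per level, and always returns []; the fuel-0 case
-- returns that same value [] directly.
mutual
-- the recursive function itself (m = fuel)
def pvA : Nat → List Int → List (List Int)
  | 0, _ => []                                  -- m ≤ 0: Python's unwinding yields []
  | 1, n_lst => n_lst.map (fun x => [x])        -- if m == 1: [[x] for x in n_lst]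
  | k + 2, n_lst => pvA_loop k n_lst 0          -- for i in range(len(n_lst)): …  (m = k+2)
termination_by m lst => (m, lst.length + 2)
decreasing_by exact Prod.Lex.right _ (by omega)
-- the 'for i in range(len(n_lst))' loop with its break (m = k+2)
def pvA_loop (k : Nat) (n_lst : List Int) (i : Nat) : List (List Int) :=
  if _h : i < n_lst.length then
    let copied := n_lst.drop i                  -- copied = n_lst[i:]
    if copied.length < k + 2 then []            -- if len(copied) < m: break
    else
      match copied with
      | [] => []                                -- unreachable (copied.length ≥ k+2 > 0)
      | number :: rest =>                       -- number = copied.pop(0)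
        ((pvA (k + 1) rest).map (fun lst => number :: lst))  -- temp = [number]; temp.extend(lst)
          ++ pvA_loop k n_lst (i + 1)
  else []
termination_by (k + 2, n_lst.length + 1 - i)
decreasing_by
  · exact Prod.Lex.left _ _ (by omega)
  · exact Prod.Lex.right _ (by omega)
end

def N_and_M (n_lst : List Int) (m : Int) : List (List Int) := pvA m.toNat n_lst

-- ===== PORT B =====
-- helpers of Source B; indices are the natural numbers 0..n-1, exactly Python's range values here
def pvStart (p : List Nat) : Nat :=             -- p[-1] + 1 if p else 0
  match p.getLast? with
  | some j => j + 1
  | none => 0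
-- one level: [p + [j] for p in partial for j in range(start p, n)]
def pvLevel (n : Nat) (ps : List (List Nat)) : List (List Nat) :=
  ps.flatMap (fun p => (List.range' (pvStart p) (n - pvStart p)).map (fun j => p ++ [j]))

def N_and_M_alt (n_lst : List Int) (m : Int) : List (List Int) :=
  let n := n_lst.length
  if m < 1 ∨ m > (n : Int) then []              -- if m < 1 or m > n: return []
  else
    -- for _ in range(m): partial = …   (range(m) has m.toNat iterations)
    let part := (List.range m.toNat).foldl (fun ps _ => pvLevel n ps) [[]]
    -- [[n_lst[j] for j in p] for p in partial]  (every j is in range, so getD is exact)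
    part.map (fun p => p.map (fun j => n_lst.getD j 0))

-- ===== PRECONDITION & SPEC =====
def Spec_N_and_M (n_lst : List Int) (m : Int) (out : List (List Int)) : Prop := out = N_and_M_alt n_lst m
instance (n_lst : List Int) (m : Int) (out : List (List Int)) : Decidable (Spec_N_and_M n_lst m out) := by unfold Spec_N_and_M; infer_instance

-- ===== CLAIM (what is proved, stated in full; the proofs are below) =====
def Claim_equal_N_and_M : Prop := ∀ (n_lst : List Int) (m : Int), Dom_N_and_M n_lst m → Spec_N_and_M n_lst m (N_and_M n_lst m)

-- ===== LEMMAS AND PROOFS =====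

-- canonical list of strictly increasing index tuples of length k drawn from s..n-1, lex order
def pvC (n : Nat) : Nat → Nat → List (List Nat)
  | _, 0 => [[]]
  | s, k + 1 => (List.range' s (n - s)).flatMap (fun j => (pvC n (j + 1) k).map (fun v => j :: v))
termination_by s k => k

theorem pvC_nil (n s k : Nat) (h : n - s < k) : pvC n s k = [] := by
  induction k generalizing s with
  | zero => omega
  | succ k ih =>
    simp only [pvC, List.flatMap_eq_nil_iff]
    intro j hj
    rw [List.mem_range'] at hj
    rw [ih (j + 1) (by omega)]
    simp

theorem pvGetD_drop (l : List Int) (s j : Nat) (d : Int) :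
    (l.drop s).getD j d = l.getD (s + j) d := by
  simp [List.getD_eq_getElem?_getD, List.getElem?_drop]

theorem pvDrop_eq_map_range' (l : List Int) (s : Nat) :
    l.drop s = (List.range' s (l.length - s)).map (fun j => l.getD j 0) := by
  apply List.ext_getElem
  · simp
  · intro t h1 h2
    simp only [List.getElem_map, List.getElem_range']
    rw [List.getElem_drop, List.getD_eq_getElem l 0 (by simp at h1 ⊢; omega)]
    simp

-- the A-side loop enumerates the suffix starting points (break ⇒ the range is truncated)
theorem pvA_loop_eq_aux (k : Nat) (L : List Int) (d : Nat) :
    ∀ i, L.length ≤ i + d →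
      pvA_loop k L i =
        (List.range' i (L.length - (k + 1) - i)).flatMap
          (fun j => (pvA (k + 1) (L.drop (j + 1))).map (fun lst => L.getD j 0 :: lst)) := by
  induction d with
  | zero =>
    intro i hi
    rw [pvA_loop]
    have h0 : L.length - (k + 1) - i = 0 := by omega
    rw [h0]
    simp [show ¬ i < L.length by omega]
  | succ d ih =>
    intro i hi
    rw [pvA_loop]
    by_cases hlt : i < L.length
    · simp only [hlt, dite_true]
      by_cases hbr : L.length - i < k + 2
      · have h0 : L.length - (k + 1) - i = 0 := by omega
        simp [h0, List.length_drop, hbr]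
      · have hlen : ¬ (L.drop i).length < k + 2 := by simp; omega
        simp only [List.length_drop, hbr, if_false]
        have hdrop : L.drop i = L[i] :: L.drop (i + 1) := List.drop_eq_getElem_cons hlt
        rw [hdrop]
        have hc : L.length - (k + 1) - i = 1 + (L.length - (k + 1) - (i + 1)) := by omega
        rw [hc, List.range'_append_1.symm, List.flatMap_append, List.range'_one]
        rw [ih (i + 1) (by omega)]
        simp [List.getD_eq_getElem?_getD, List.getElem?_eq_getElem hlt]
    · simp only [hlt, dite_false]
      have h0 : L.length - (k + 1) - i = 0 := by omega
      rw [h0]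
      simp

theorem pvA_loop_eq (k : Nat) (L : List Int) (i : Nat) :
    pvA_loop k L i =
      (List.range' i (L.length - (k + 1) - i)).flatMap
        (fun j => (pvA (k + 1) (L.drop (j + 1))).map (fun lst => L.getD j 0 :: lst)) :=
  pvA_loop_eq_aux k L L.length i (by omega)

-- A equals the canonical enumeration mapped through the original list
theorem pvA_eq_C (k : Nat) (lst0 : List Int) : ∀ s : Nat,
    pvA (k + 1) (lst0.drop s) =
      (pvC lst0.length s (k + 1)).map (fun v => v.map (fun j => lst0.getD j 0)) := by
  induction k with
  | zero =>
    intro s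
    rw [show (0:Nat) + 1 = 1 from rfl, pvA]
    rw [pvDrop_eq_map_range' lst0 s]
    simp only [pvC, List.map_flatMap, List.map_map, List.map_cons,
      List.map_nil]
    rw [← List.map_eq_flatMap]
    simp [Function.comp]
  | succ k ih =>
    intro s
    rw [show k + 1 + 1 = k + 2 from rfl, pvA, pvA_loop_eq]
    simp only [List.length_drop, Nat.sub_zero, List.drop_drop, pvGetD_drop]
    conv_rhs => rw [pvC]
    have hsplit : List.range' s (lst0.length - s)
        = List.range' s (lst0.length - s - (k + 1))
          ++ List.range' (s + (lst0.length - s - (k + 1)))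
               ((lst0.length - s) - (lst0.length - s - (k + 1))) := by
      rw [List.range'_append_1]
      congr 1
      omega
    have hnil : (List.range' (s + (lst0.length - s - (k + 1)))
          ((lst0.length - s) - (lst0.length - s - (k + 1)))).flatMap
        (fun j => (pvC lst0.length (j + 1) (k + 1)).map (fun v => j :: v)) = [] := by
      rw [List.flatMap_eq_nil_iff]
      intro j hj
      rw [List.mem_range'] at hj
      rw [pvC_nil lst0.length (j + 1) (k + 1) (by omega)]
      simp
    rw [hsplit, List.flatMap_append, List.map_append, hnil]
    simp only [List.map_nil, List.append_nil, List.map_flatMap]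
    -- reindex A's relative loop counter j to the absolute index s + j
    rw [List.range'_eq_map_range (s := s), List.flatMap_map,
        show List.range' 0 (lst0.length - s - (k + 1))
            = List.range (lst0.length - s - (k + 1)) from List.range_eq_range'.symm]
    apply List.flatMap_congr
    intro j _
    rw [show s + (j + 1) = s + j + 1 from by omega, ih (s + j + 1)]
    simp [List.map_map, Function.comp]

-- iterating B's level map accumulates the canonical tails
theorem pvLevel_iter (n k : Nat) : ∀ ps : List (List Nat),
    (pvLevel n)^[k] ps = ps.flatMap (fun p => (pvC n (pvStart p) k).map (fun v => p ++ v)) := by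
  induction k with
  | zero =>
    intro ps
    simp [pvC]
  | succ k ih =>
    intro ps
    rw [Function.iterate_succ_apply, ih]
    simp only [pvLevel, List.flatMap_assoc, pvC]
    apply List.flatMap_congr
    intro p _
    rw [List.flatMap_map, List.map_flatMap]
    apply List.flatMap_congr
    intro j _
    simp [Function.comp, pvStart, List.map_map]

theorem foldl_const_iter {α : Type} (f : α → α) (M : Nat) (init : α) :
    (List.range M).foldl (fun a _ => f a) init = f^[M] init := by
  induction M generalizing init with
  | zero => rfl
  | succ M ih => rw [List.range_succ, List.foldl_append]; simp [ih, Function.iterate_succ_apply']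

-- ===== VERDICT (by name: the statement is the Claim_ definition above) =====
theorem N_and_M_spec : Claim_equal_N_and_M := by
  intro n_lst m _
  unfold Spec_N_and_M N_and_M N_and_M_alt
  by_cases hm1 : m < 1
  · -- m ≤ 0: A's recursion bottoms out with [], B's guard returns []
    simp only [hm1, true_or, if_true]
    rw [show m.toNat = 0 from by omega, pvA]
  · obtain ⟨k, hk⟩ : ∃ k, m.toNat = k + 1 := ⟨m.toNat - 1, by omega⟩
    have hA := pvA_eq_C k n_lst 0
    simp only [List.drop_zero] at hA
    by_cases hmn : m > (n_lst.length : Int)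
    · -- m > n: both sides are empty (pvC has no tuples of that length)
      simp only [hm1, hmn, or_true, if_true]
      rw [hk, hA, pvC_nil _ _ _ (by omega)]
      simp
    · simp only [hm1, hmn, or_self, if_false]
      rw [hk]
      simp only [foldl_const_iter, pvLevel_iter]
      rw [hA]
      simp [pvStart]
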